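-- pv_equiv track=rewrite | github.com/Isaacmaffo96/Laboratory_of_competitive_programming2023 | exe_4pt1/03_hare_tortoise.py | fs_solution
-- ===== SOURCE A (Python) =====
-- def fs_solution(l):
--
--     # no cycles in an empty sequence
--     if len(l) == 0:
--         return False
--
--     fast = 0
--     slow = 0
--
--     # FAST and SLOW keep jumping, FAST jumps twice faster than SLOW
--     # FAST will reach the end of the sequence before SLOW
--     # fast jumps -> pos check -> slow jumps -> fast jumps -> pos check
--     while fast is not None:
--         fast = l[fast]
--         if fast == slow:
--             return True
--         slow = l[slow]
--         if fast is None: # l over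
--             break
--         fast = l[fast]
--         if fast == slow:
--             return True
--
--     return False
-- ===== SOURCE B (Python) =====
-- def fs_solution(l):
--     if not l:
--         return False
--     visited = set()
--     cur = 0
--     while cur is not None:
--         if cur in visited:
--             return True
--         visited.add(cur)
--         cur = l[cur]
--     return False
-- ===== Notes on version B (the rewrite author's own statement) =====
-- stated objective: simpler
-- what changed: Replaces Floyd's two-speed hare/tortoise loop (two pointers, two equality checks per iteration) by a single-pointer walk that records seen indices in a set and stops on the first revisit or on None.
import Mathlib
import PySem

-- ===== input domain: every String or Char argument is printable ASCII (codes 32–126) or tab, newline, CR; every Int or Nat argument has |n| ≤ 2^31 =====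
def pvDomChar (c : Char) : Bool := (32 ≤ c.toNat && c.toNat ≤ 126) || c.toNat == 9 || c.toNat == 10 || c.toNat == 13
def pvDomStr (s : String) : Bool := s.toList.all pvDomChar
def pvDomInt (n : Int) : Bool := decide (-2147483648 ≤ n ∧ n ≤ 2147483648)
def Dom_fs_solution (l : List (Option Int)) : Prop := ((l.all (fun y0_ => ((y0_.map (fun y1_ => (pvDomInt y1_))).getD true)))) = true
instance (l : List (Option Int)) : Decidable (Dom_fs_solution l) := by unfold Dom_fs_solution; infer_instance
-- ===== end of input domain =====

-- B replaces Floyd's two-speed tortoise/hare loop by a single walk with a visited set; objective: simpler.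

-- l[i] for an Int index i: a None entry and an out-of-range index (Python IndexError,
-- excluded by Pre_) are both `none`; exact on Pre_, where every reached index is in range.
def pvGetSucc (l : List (Option Int)) (i : Int) : Option Int :=
  (PySem.List.pyGet? l i).join

-- ===== PORT A =====
-- Floyd loop; fuel only makes the recursion total (it never runs out under Pre_);
-- the `none` slow-index branch models Python's TypeError, unreachable under Pre_.
def fsA_loop (l : List (Option Int)) : Option Int → Option Int → Nat → Bool
  | _, _, 0 => false
  | none, _, _ + 1 => false                    -- while fast is not None: exit
  | some f, slow, fuel + 1 =>
    let fast1 := pvGetSucc l f                 -- fast = l[fast]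
    if fast1 = slow then true                  -- if fast == slow: return True
    else
      match slow with
      | none => false                          -- Python TypeError; unreachable under Pre_
      | some s =>
        let slow1 := pvGetSucc l s             -- slow = l[slow]
        match fast1 with
        | none => false                        -- if fast is None: break
        | some f1 =>
          let fast2 := pvGetSucc l f1          -- fast = l[fast]
          if fast2 = slow1 then true           -- if fast == slow: return True
          else fsA_loop l fast2 slow1 fuel

def fs_solution (l : List (Option Int)) : Bool :=
  if l.length = 0 then false
  else fsA_loop l (some 0) (some 0) ((2 * l.length + 1) ^ 2)

-- ===== PORT B =====
-- visited-set walk; fuel only makes the recursion total (it never runs out under Pre_).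
def fsB_loop (l : List (Option Int)) : PySem.Set Int → Option Int → Nat → Bool
  | _, _, 0 => false
  | _, none, _ + 1 => false                    -- while cur is not None: exit
  | visited, some c, fuel + 1 =>
    if PySem.Set.contains visited c then true  -- if cur in visited: return True
    else fsB_loop l (PySem.Set.add visited c) (pvGetSucc l c) fuel

def fs_solution_alt (l : List (Option Int)) : Bool :=
  if l = [] then false
  else fsB_loop l PySem.Set.empty (some 0) ((2 * l.length + 1) ^ 2)

-- ===== PRECONDITION & SPEC =====
-- The successor path from index 0: pvPath l k is the walk position after k jumps.
def pvStep (l : List (Option Int)) (x : Option Int) : Option Int :=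
  x.bind (pvGetSucc l)

def pvPath (l : List (Option Int)) (k : Nat) : Option Int :=
  (pvStep l)^[k] (some 0)

-- Pre_ excludes exactly the inputs on which Python A raises IndexError: those whose
-- successor walk from index 0 reaches an out-of-range index (the first 2*len+1 walk
-- positions suffice to check: past them the walk has either ended or cycled).
def Pre_fs_solution (l : List (Option Int)) : Prop :=
  l = [] ∨ ∀ k, k ≤ 2 * l.length + 1 →
    ((pvPath l k).all (fun v => decide (-(l.length : Int) ≤ v ∧ v < l.length))) = true

instance (l : List (Option Int)) : Decidable (Pre_fs_solution l) := by
  unfold Pre_fs_solution; infer_instance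

def pvWitness_fs_solution : List (Option Int) := [some 1, some 0, none]

def Spec_fs_solution (l : List (Option Int)) (out : Bool) : Prop := out = fs_solution_alt l
instance (l : List (Option Int)) (out : Bool) : Decidable (Spec_fs_solution l out) := by unfold Spec_fs_solution; infer_instance

-- ===== CLAIM (what is proved, stated in full; the proofs are below) =====
def Claim_equal_fs_solution : Prop := ∀ (l : List (Option Int)), Dom_fs_solution l → Pre_fs_solution l → Spec_fs_solution l (fs_solution l)

-- ===== LEMMAS AND PROOFS =====

theorem pvPath_succ (l : List (Option Int)) (k : Nat) :
    pvPath l (k + 1) = pvStep l (pvPath l k) := by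
  simp [pvPath, Function.iterate_succ_apply']

theorem pvPath_succ_some (l : List (Option Int)) (k : Nat) (u : Int)
    (h : pvPath l k = some u) : pvPath l (k + 1) = pvGetSucc l u := by
  simp [pvPath_succ, h, pvStep]

theorem pvPath_none_mono (l : List (Option Int)) (k m : Nat)
    (h : pvPath l k = none) (hkm : k ≤ m) : pvPath l m = none := by
  obtain ⟨j, rfl⟩ := Nat.exists_eq_add_of_le hkm
  have : pvPath l (k + j) = (pvStep l)^[j] (pvPath l k) := by
    simp [pvPath, Nat.add_comm k j, Function.iterate_add_apply]
  rw [this, h]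
  exact Function.iterate_fixed rfl j

theorem pvPath_range (l : List (Option Int))
    (hP : ∀ k, k ≤ 2 * l.length + 1 →
      ((pvPath l k).all (fun v => decide (-(l.length : Int) ≤ v ∧ v < l.length))) = true)
    (k : Nat) (hk : k ≤ 2 * l.length + 1) (v : Int) (h : pvPath l k = some v) :
    -(l.length : Int) ≤ v ∧ v < l.length := by
  have := hP k hk
  rw [h] at this
  simpa using this

-- periodicity: a repeat propagates forward
theorem pvPath_period (l : List (Option Int)) (a d : Nat)
    (h : pvPath l a = pvPath l (a + d)) (m : Nat) :
    pvPath l (a + m + d) = pvPath l (a + m) := by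
  induction m with
  | zero => simpa [Nat.add_comm] using h.symm
  | succ m ih =>
    have e1 : a + (m + 1) + d = (a + m + d) + 1 := by omega
    have e2 : a + (m + 1) = (a + m) + 1 := by omega
    rw [e1, pvPath_succ, ih, e2, pvPath_succ]

theorem pvPath_period_mul (l : List (Option Int)) (a d : Nat)
    (h : pvPath l a = pvPath l (a + d)) (c m : Nat) :
    pvPath l (a + m + c * d) = pvPath l (a + m) := by
  induction c with
  | zero => simp
  | succ c ih =>
    have e1 : a + m + (c + 1) * d = a + (m + c * d) + d := by ring_nf
    rw [e1, pvPath_period l a d h (m + c * d), ← Nat.add_assoc, ih]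

theorem pvPath_neverNone_of_repeat (l : List (Option Int)) (a d : Nat) (hd : 0 < d)
    (h : pvPath l a = pvPath l (a + d)) (ha : pvPath l a ≠ none) (k : Nat) :
    pvPath l k ≠ none := by
  intro hk
  have hle : k ≤ a + 0 + k * d := by
    have : k ≤ k * d := Nat.le_mul_of_pos_right k hd
    omega
  have := pvPath_none_mono l k (a + 0 + k * d) hk hle
  rw [pvPath_period_mul l a d h k 0] at this
  simp at this
  exact ha this

-- pigeonhole: if the path survives 2n steps it has repeated
theorem pvPath_repeat (l : List (Option Int))
    (hP : ∀ k, k ≤ 2 * l.length + 1 →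
      ((pvPath l k).all (fun v => decide (-(l.length : Int) ≤ v ∧ v < l.length))) = true)
    (hl : l ≠ [])
    (h2 : ∀ k, k ≤ 2 * l.length → pvPath l k ≠ none) :
    ∃ a d, 0 < d ∧ a + d ≤ 2 * l.length ∧ pvPath l a = pvPath l (a + d) := by
  classical
  set n := l.length with hn
  have hn1 : 1 ≤ n := List.length_pos_of_ne_nil hl
  have hmaps : ∀ k ∈ Finset.range (2 * n + 1),
      (pvPath l k).getD 0 ∈ Finset.Icc (-(n : Int)) ((n : Int) - 1) := by
    intro k hk
    simp only [Finset.mem_range] at hk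
    cases hp : pvPath l k with
    | none => exact absurd hp (h2 k (by omega))
    | some v =>
      have hb := pvPath_range l hP k (by omega) v hp
      simp only [Option.getD_some, Finset.mem_Icc]
      omega
  have hcard : (Finset.Icc (-(n : Int)) ((n : Int) - 1)).card < (Finset.range (2 * n + 1)).card := by
    rw [Int.card_Icc, Finset.card_range]
    have : ((n : Int) - 1 + 1 - -(n : Int)) = 2 * n := by ring
    rw [this]
    omega
  obtain ⟨i, hi, j, hj, hij, hfij⟩ :=
    Finset.exists_ne_map_eq_of_card_lt_of_maps_to hcard hmaps
  simp only [Finset.mem_range] at hi hj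
  have hpath : ∀ i j : Nat, i ≤ 2 * n → j ≤ 2 * n →
      (pvPath l i).getD 0 = (pvPath l j).getD 0 → pvPath l i = pvPath l j := by
    intro i j hi hj he
    cases hp : pvPath l i with
    | none => exact absurd hp (h2 i hi)
    | some v =>
      cases hq : pvPath l j with
      | none => exact absurd hq (h2 j hj)
      | some w => rw [hp, hq] at he; simpa using he
  rcases Nat.lt_or_ge i j with hlt | hge
  · exact ⟨i, j - i, by omega, by omega,
      by have := hpath i j (by omega) (by omega) hfij; rwa [show i + (j - i) = j by omega]⟩
  · have hlt : j < i := by omega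
    exact ⟨j, i - j, by omega, by omega,
      by have := hpath j i (by omega) (by omega) hfij.symm; rwa [show j + (i - j) = i by omega]⟩

-- Floyd meeting point: under a repeat there is m ≥ 1 with path(2m) = path(m), m ≤ 4n²
theorem pvPath_meet (l : List (Option Int)) (a d : Nat) (hd : 0 < d)
    (hrep : pvPath l a = pvPath l (a + d)) :
    ∃ m, 1 ≤ m ∧ m ≤ d * (a + 1) ∧ pvPath l (2 * m) = pvPath l m := by
  refine ⟨d * (a + 1), by nlinarith, le_refl _, ?_⟩
  have hma : a ≤ d * (a + 1) := by nlinarith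
  have := pvPath_period_mul l a d hrep (a + 1) (d * (a + 1) - a)
  have e1 : a + (d * (a + 1) - a) + (a + 1) * d = 2 * (d * (a + 1)) := by
    rw [Nat.mul_comm (a+1) d]; omega
  have e2 : a + (d * (a + 1) - a) = d * (a + 1) := by omega
  rwa [e1, e2] at this

-- injectivity before the first none
theorem pvPath_inj (l : List (Option Int)) (t : Nat) (ht : pvPath l t = none)
    (i j : Nat) (hij : i < j) (_hjt : j < t) (hi : pvPath l i ≠ none) :
    pvPath l i ≠ pvPath l j := fun he =>
  pvPath_neverNone_of_repeat l i (j - i) (by omega)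
    (by rwa [show i + (j - i) = j by omega]) hi t ht

-- ===== A's loop =====
theorem fsA_false (l : List (Option Int)) (_hP : Pre_fs_solution l) (_hl : l ≠ [])
    (t : Nat) (ht : pvPath l t = none) :
    ∀ fuel j, fsA_loop l (pvPath l (2 * j)) (pvPath l j) fuel = false := by
  have hmono : ∀ k, pvPath l k ≠ none → k < t := by
    intro k hk
    by_contra h
    exact hk (pvPath_none_mono l t k ht (by omega))
  intro fuel
  induction fuel with
  | zero => intro j; cases pvPath l (2 * j) <;> simp [fsA_loop]
  | succ fuel ih =>
    intro j
    cases h2j : pvPath l (2 * j) with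
    | none => simp [fsA_loop]
    | some f =>
      have h2jt : 2 * j < t := hmono _ (by rw [h2j]; simp)
      have hjs : ∃ v, pvPath l j = some v := by
        cases hj : pvPath l j with
        | none => exact absurd (pvPath_none_mono l j (2 * j) hj (by omega)) (by rw [h2j]; simp)
        | some v => exact ⟨v, rfl⟩
      obtain ⟨vj, hvj⟩ := hjs
      have hf1 : pvGetSucc l f = pvPath l (2 * j + 1) := (pvPath_succ_some l (2 * j) f h2j).symm
      have hs1 : pvGetSucc l vj = pvPath l (j + 1) := (pvPath_succ_some l j vj hvj).symm
      have hne1 : pvPath l (2 * j + 1) ≠ some vj := by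
        cases h1 : pvPath l (2 * j + 1) with
        | none => simp
        | some f1 =>
          have h1t : 2 * j + 1 < t := hmono _ (by rw [h1]; simp)
          have := pvPath_inj l t ht j (2 * j + 1) (by omega) h1t (by rw [hvj]; simp)
          rw [hvj, h1] at this
          exact fun he => this he.symm
      simp only [fsA_loop, hf1, hvj, hs1]
      rw [if_neg hne1]
      cases h1 : pvPath l (2 * j + 1) with
      | none => simp
      | some f1 =>
        have h1t : 2 * j + 1 < t := hmono _ (by rw [h1]; simp)
        have hf2 : pvGetSucc l f1 = pvPath l (2 * j + 2) := (pvPath_succ_some l (2 * j + 1) f1 h1).symm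
        simp only [hf2]
        have hj1s : ∃ w, pvPath l (j + 1) = some w := by
          cases hw : pvPath l (j + 1) with
          | none => exact absurd (pvPath_none_mono l (j + 1) (2 * j + 1) hw (by omega)) (by rw [h1]; simp)
          | some w => exact ⟨w, rfl⟩
        obtain ⟨w, hw⟩ := hj1s
        have hne2 : pvPath l (2 * j + 2) ≠ pvPath l (j + 1) := by
          cases h2 : pvPath l (2 * j + 2) with
          | none => rw [hw]; simp
          | some f2 =>
            have h2t : 2 * j + 2 < t := hmono _ (by rw [h2]; simp)
            have := pvPath_inj l t ht (j + 1) (2 * j + 2) (by omega) h2t (by rw [hw]; simp)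
            rw [h2] at this
            exact fun he => this he.symm
        rw [if_neg hne2]
        have e2 : 2 * j + 2 = 2 * (j + 1) := by omega
        rw [e2]
        exact ih (j + 1)

theorem fsA_true (l : List (Option Int)) (_hP : Pre_fs_solution l) (_hl : l ≠ [])
    (hN : ∀ k, pvPath l k ≠ none) (m : Nat) (hm1 : 1 ≤ m)
    (hmeet : pvPath l (2 * m) = pvPath l m) :
    ∀ fuel j, j < m → m - j ≤ fuel →
      fsA_loop l (pvPath l (2 * j)) (pvPath l j) fuel = true := by
  have hsome : ∀ k, ∃ v, pvPath l k = some v := by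
    intro k
    cases h : pvPath l k with
    | none => exact absurd h (hN k)
    | some v => exact ⟨v, rfl⟩
  intro fuel
  induction fuel with
  | zero => intro j hj hf; omega
  | succ fuel ih =>
    intro j hj hf
    obtain ⟨f, h2j⟩ := hsome (2 * j)
    obtain ⟨vj, hvj⟩ := hsome j
    have hf1 : pvGetSucc l f = pvPath l (2 * j + 1) := (pvPath_succ_some l (2 * j) f h2j).symm
    have hs1 : pvGetSucc l vj = pvPath l (j + 1) := (pvPath_succ_some l j vj hvj).symm
    rw [h2j]
    simp only [fsA_loop, hf1, hvj, hs1]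
    by_cases hc1 : pvPath l (2 * j + 1) = some vj
    · rw [if_pos hc1]
    · rw [if_neg hc1]
      obtain ⟨f1, h1⟩ := hsome (2 * j + 1)
      rw [h1]
      have hf2 : pvGetSucc l f1 = pvPath l (2 * j + 2) := (pvPath_succ_some l (2 * j + 1) f1 h1).symm
      simp only [hf2]
      by_cases hc2 : pvPath l (2 * j + 2) = pvPath l (j + 1)
      · rw [if_pos hc2]
      · rw [if_neg hc2]
        have hjm : j + 1 < m := by
          rcases Nat.lt_or_ge (j + 1) m with h | h
          · exact h
          · exfalso
            have : j + 1 = m := by omega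
            subst this
            have e : 2 * j + 2 = 2 * (j + 1) := by omega
            rw [e, hmeet] at hc2
            exact hc2 rfl
        have e2 : 2 * j + 2 = 2 * (j + 1) := by omega
        rw [e2]
        exact ih (j + 1) hjm (by omega)

-- ===== B's loop =====
theorem fsB_false (l : List (Option Int)) (_hP : Pre_fs_solution l) (_hl : l ≠ [])
    (t : Nat) (ht : pvPath l t = none) :
    ∀ fuel k visited, k ≤ t →
      (∀ c : Int, c ∈ visited ↔ ∃ i, i < k ∧ pvPath l i = some c) →
      fsB_loop l visited (pvPath l k) fuel = false := by
  have hmono : ∀ k, pvPath l k ≠ none → k < t := by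
    intro k hk
    by_contra h
    exact hk (pvPath_none_mono l t k ht (by omega))
  intro fuel
  induction fuel with
  | zero => intro k visited _ _; cases pvPath l k <;> simp [fsB_loop]
  | succ fuel ih =>
    intro k visited hkt hinv
    cases hk : pvPath l k with
    | none => simp [fsB_loop]
    | some c =>
      have hkt' : k < t := hmono _ (by rw [hk]; simp)
      have hnotmem : c ∉ visited := by
        intro hc
        obtain ⟨i, hik, hpi⟩ := (hinv c).mp hc
        exact pvPath_inj l t ht i k hik hkt' (by rw [hpi]; simp) (by rw [hpi, hk])
      have hcont : ¬ (PySem.Set.contains visited c = true) := by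
        rw [PySem.Set.contains_iff]
        exact hnotmem
      simp only [fsB_loop]
      rw [if_neg hcont]
      have hnext : pvGetSucc l c = pvPath l (k + 1) := (pvPath_succ_some l k c hk).symm
      rw [hnext]
      apply ih (k + 1) _ (by omega)
      intro c'
      rw [PySem.Set.mem_add, hinv c']
      constructor
      · rintro (⟨i, hik, hpi⟩ | rfl)
        · exact ⟨i, by omega, hpi⟩
        · exact ⟨k, by omega, hk⟩
      · rintro ⟨i, hik, hpi⟩
        rcases Nat.lt_or_ge i k with h | h
        · exact Or.inl ⟨i, h, hpi⟩
        · have : i = k := by omega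
          subst this
          rw [hk] at hpi
          exact Or.inr (by simpa using hpi.symm)

theorem fsB_true (l : List (Option Int)) (_hP : Pre_fs_solution l) (_hl : l ≠ [])
    (hN : ∀ k, pvPath l k ≠ none) (r : Nat)
    (hr : ∃ i, i < r ∧ pvPath l i = pvPath l r)
    (hrmin : ∀ j, j < r → ¬ ∃ i, i < j ∧ pvPath l i = pvPath l j) :
    ∀ fuel k visited, k ≤ r → r - k + 1 ≤ fuel →
      (∀ c : Int, c ∈ visited ↔ ∃ i, i < k ∧ pvPath l i = some c) →
      fsB_loop l visited (pvPath l k) fuel = true := by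
  have hsome : ∀ k, ∃ v, pvPath l k = some v := by
    intro k
    cases h : pvPath l k with
    | none => exact absurd h (hN k)
    | some v => exact ⟨v, rfl⟩
  intro fuel
  induction fuel with
  | zero => intro k visited hkr hf _; omega
  | succ fuel ih =>
    intro k visited hkr hf hinv
    obtain ⟨c, hk⟩ := hsome k
    rw [hk]
    simp only [fsB_loop]
    by_cases hmem : c ∈ visited
    · rw [if_pos (show PySem.Set.contains visited c = true by rw [PySem.Set.contains_iff]; exact hmem)]
    · have hkr' : k < r := by
        rcases Nat.lt_or_ge k r with h | h
        · exact h
        · exfalso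
          have : k = r := by omega
          subst this
          obtain ⟨i, hik, hpi⟩ := hr
          apply hmem
          exact (hinv c).mpr ⟨i, hik, by rw [hpi, hk]⟩
      rw [if_neg (show ¬ PySem.Set.contains visited c = true by rw [PySem.Set.contains_iff]; exact hmem)]
      have hnext : pvGetSucc l c = pvPath l (k + 1) := (pvPath_succ_some l k c hk).symm
      rw [hnext]
      apply ih (k + 1) _ (by omega) (by omega)
      intro c'
      rw [PySem.Set.mem_add, hinv c']
      constructor
      · rintro (⟨i, hik, hpi⟩ | rfl)
        · exact ⟨i, by omega, hpi⟩
        · exact ⟨k, by omega, hk⟩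
      · rintro ⟨i, hik, hpi⟩
        rcases Nat.lt_or_ge i k with h | h
        · exact Or.inl ⟨i, h, hpi⟩
        · have : i = k := by omega
          subst this
          rw [hk] at hpi
          exact Or.inr (by simpa using hpi.symm)

-- ===== VERDICT (by name: the statement is the Claim_ definition above) =====
theorem fs_solution_spec : Claim_equal_fs_solution := by
  intro l _ hP
  unfold Spec_fs_solution
  by_cases hl : l = []
  · subst hl; rfl
  · have hn1 : 0 < l.length := List.length_pos_of_ne_nil hl
    rw [fs_solution, fs_solution_alt, if_neg (by omega), if_neg hl]
    have hinv0 : ∀ c : Int, c ∈ (PySem.Set.empty : PySem.Set Int) ↔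
        ∃ i, i < 0 ∧ pvPath l i = some c := by
      intro c; simp [PySem.Set.empty]
    by_cases hN : ∀ k, pvPath l k ≠ none
    · obtain ⟨a, d, hd, hbound, hrep⟩ := pvPath_repeat l (hP.resolve_left hl) hl (fun k _ => hN k)
      obtain ⟨m, hm1, hm2, hmeet⟩ := pvPath_meet l a d hd hrep
      have hmfuel : m ≤ (2 * l.length + 1) ^ 2 := by nlinarith
      have hA : fsA_loop l (pvPath l (2 * 0)) (pvPath l 0) ((2 * l.length + 1) ^ 2) = true :=
        fsA_true l hP hl hN m hm1 hmeet _ 0 hm1 (by omega)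
      have hex : ∃ r, ∃ i, i < r ∧ pvPath l i = pvPath l r := ⟨a + d, a, by omega, hrep⟩
      have hrb : Nat.find hex ≤ a + d := Nat.find_le ⟨a, by omega, hrep⟩
      have hB : fsB_loop l PySem.Set.empty (pvPath l 0) ((2 * l.length + 1) ^ 2) = true :=
        fsB_true l hP hl hN (Nat.find hex) (Nat.find_spec hex)
          (fun j hj => Nat.find_min hex hj) _ 0 PySem.Set.empty (by omega)
          (by
            have h1 : Nat.find hex ≤ 2 * l.length := le_trans hrb hbound
            have h2 : 2 * l.length + 1 ≤ (2 * l.length + 1) ^ 2 := Nat.le_self_pow (by norm_num) _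
            omega) hinv0
      have hA' : fsA_loop l (some 0) (some 0) ((2 * l.length + 1) ^ 2) = true := hA
      have hB' : fsB_loop l PySem.Set.empty (some 0) ((2 * l.length + 1) ^ 2) = true := hB
      rw [hA', hB']
    · obtain ⟨t, ht'⟩ := not_forall.mp hN
      have ht : pvPath l t = none := not_not.mp ht'
      have hA : fsA_loop l (pvPath l (2 * 0)) (pvPath l 0) ((2 * l.length + 1) ^ 2) = false :=
        fsA_false l hP hl t ht _ 0
      have hB : fsB_loop l PySem.Set.empty (pvPath l 0) ((2 * l.length + 1) ^ 2) = false :=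
        fsB_false l hP hl t ht _ 0 PySem.Set.empty (by omega) hinv0
      have hA' : fsA_loop l (some 0) (some 0) ((2 * l.length + 1) ^ 2) = false := hA
      have hB' : fsB_loop l PySem.Set.empty (some 0) ((2 * l.length + 1) ^ 2) = false := hB
      rw [hA', hB']
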